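-- pv_equiv track=rewrite | github.com/nick-syz/algorithms_2 | GenerateBBSTArray.py | FindKeyIndex
-- ===== SOURCE A (Python) =====
-- def FindKeyIndex(tree, key, i=0):
--     if i >= len(tree):
--         return None
--     elif tree[i] is None:
--         return -i
--     if key < tree[i]:
--         return FindKeyIndex(tree, key, 2*i+1)
--     elif tree[i] == key:
--         return i
--     else:
--         return FindKeyIndex(tree, key, 2*i+2)
-- ===== SOURCE B (Python) =====
-- def FindKeyIndex(tree, key, i=0):
--     n = len(tree)
--     while i < n:
--         v = tree[i]
--         if v is None:
--             return -i
--         if key < v: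
--             i = 2 * i + 1
--         elif v == key:
--             return i
--         else:
--             i = 2 * i + 2
--     return None
-- ===== Notes on version B (the rewrite author's own statement) =====
-- stated objective: simpler
-- what changed: Replaces the recursive tree walk by an iterative while-loop that maintains only the running index i; no call stack is used.
-- outside the precondition, e.g. on FindKeyIndex([None], 5, -1): A returns 1, B returns 1; on FindKeyIndex([5], 0, -1): A raises RecursionError, B does not finish within the time limit; on FindKeyIndex([2, 1, 3], 0, -3): A raises IndexError, B raises IndexError
import Mathlib
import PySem

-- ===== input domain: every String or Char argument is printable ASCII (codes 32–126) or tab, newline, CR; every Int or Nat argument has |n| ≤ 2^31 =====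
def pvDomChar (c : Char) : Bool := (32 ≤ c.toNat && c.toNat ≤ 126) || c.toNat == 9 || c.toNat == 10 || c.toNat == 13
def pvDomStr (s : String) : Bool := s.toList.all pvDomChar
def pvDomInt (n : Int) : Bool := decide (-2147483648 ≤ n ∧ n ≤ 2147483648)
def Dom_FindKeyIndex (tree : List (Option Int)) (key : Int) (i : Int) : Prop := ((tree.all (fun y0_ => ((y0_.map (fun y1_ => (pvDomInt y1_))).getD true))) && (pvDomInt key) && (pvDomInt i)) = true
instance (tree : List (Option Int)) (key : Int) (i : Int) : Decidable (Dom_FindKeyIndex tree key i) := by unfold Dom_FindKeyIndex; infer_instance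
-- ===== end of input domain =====

-- B rewrites A's recursive BST-array search as an iterative while-loop over the single index i (objective: simpler).

-- ===== PORT A =====
-- Literal port of A's recursion.  The `i < 0` branch is a totality guard only:
-- such inputs are outside Pre_ (Python there wraps indices and raises or recurses forever).
def FindKeyIndex (tree : List (Option Int)) (key : Int) (i : Int) : Option Int :=
  if (tree.length : Int) ≤ i then none
  else if i < 0 then none
  else
    match PySem.List.pyGet? tree i with
    | none => none              -- IndexError: unreachable for 0 ≤ i < len
    | some none => some (-i)
    | some (some v) =>
      if key < v then FindKeyIndex tree key (2*i+1)
      else if v = key then some i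
      else FindKeyIndex tree key (2*i+2)
termination_by (tree.length - i).toNat
decreasing_by all_goals omega

-- ===== PORT B =====
-- While-loop of Source B, transcribed with an explicit fuel (loop-totality device only;
-- tree.length + 1 iterations always suffice when 0 ≤ i, see lemma below).
def findLoopB (tree : List (Option Int)) (key : Int) : Nat → Int → Option Int
  | 0, _ => none
  | fuel+1, i =>
    if i < (tree.length : Int) then
      match PySem.List.pyGet? tree i with
      | none => none            -- IndexError: unreachable for 0 ≤ i < len
      | some none => some (-i)
      | some (some v) =>
        if key < v then findLoopB tree key fuel (2*i+1)
        else if v = key then some i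
        else findLoopB tree key fuel (2*i+2)
    else none

def FindKeyIndex_alt (tree : List (Option Int)) (key : Int) (i : Int) : Option Int :=
  findLoopB tree key (tree.length + 1) i

-- ===== PRECONDITION & SPEC =====
-- Pre_ excludes negative start indices i: there Python's negative-index wraparound makes
-- A's behaviour accidental (on almost all such inputs A raises IndexError or RecursionError,
-- and B behaves the same way, looping where A recurses).
def Pre_FindKeyIndex (tree : List (Option Int)) (key : Int) (i : Int) : Prop := 0 ≤ i
instance (tree : List (Option Int)) (key : Int) (i : Int) : Decidable (Pre_FindKeyIndex tree key i) := by unfold Pre_FindKeyIndex; infer_instance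
def pvWitness_FindKeyIndex : List (Option Int) × Int × Int := ([some 5, some 2, some 8, none], 8, 0)

def Spec_FindKeyIndex (tree : List (Option Int)) (key : Int) (i : Int) (out : Option Int) : Prop := out = FindKeyIndex_alt tree key i
instance (tree : List (Option Int)) (key : Int) (i : Int) (out : Option Int) : Decidable (Spec_FindKeyIndex tree key i out) := by unfold Spec_FindKeyIndex; infer_instance

-- ===== CLAIM (what is proved, stated in full; the proofs are below) =====
def Claim_equal_FindKeyIndex : Prop := ∀ (tree : List (Option Int)) (key : Int) (i : Int), Dom_FindKeyIndex tree key i → Pre_FindKeyIndex tree key i → Spec_FindKeyIndex tree key i (FindKeyIndex tree key i)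

-- ===== LEMMAS AND PROOFS =====

-- With enough fuel (len ≤ i + fuel) the loop computes exactly A's recursion, for 0 ≤ i.
theorem findLoopB_eq (tree : List (Option Int)) (key : Int) :
    ∀ (fuel : Nat) (i : Int), 0 ≤ i → (tree.length : Int) ≤ i + fuel →
      findLoopB tree key fuel i = FindKeyIndex tree key i := by
  intro fuel
  induction fuel with
  | zero =>
    intro i hi hlen
    rw [FindKeyIndex]
    simp only [findLoopB]
    rw [if_pos (by omega)]
  | succ n ih =>
    intro i hi hlen
    rw [FindKeyIndex]
    simp only [findLoopB]
    by_cases hlt : i < (tree.length : Int)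
    · rw [if_pos hlt, if_neg (by omega), if_neg (by omega)]
      cases hget : PySem.List.pyGet? tree i with
      | none => rfl
      | some o =>
        cases o with
        | none => rfl
        | some v =>
          dsimp only
          by_cases hk : key < v
          · rw [if_pos hk, if_pos hk, ih (2*i+1) (by omega) (by push_cast at hlen ⊢; omega)]
          · rw [if_neg hk, if_neg hk]
            by_cases he : v = key
            · rw [if_pos he, if_pos he]
            · rw [if_neg he, if_neg he, ih (2*i+2) (by omega) (by push_cast at hlen ⊢; omega)]
    · rw [if_neg hlt, if_pos (by omega)]

-- ===== VERDICT (by name: the statement is the Claim_ definition above) =====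
theorem FindKeyIndex_spec : Claim_equal_FindKeyIndex := by
  intro tree key i _ hpre
  have hi : (0:Int) ≤ i := hpre
  unfold Spec_FindKeyIndex FindKeyIndex_alt
  exact (findLoopB_eq tree key (tree.length + 1) i hi (by push_cast; omega)).symm
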